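-- pv_equiv track=rewrite | github.com/alexro/pypypy | SpbGU/F.py | parse
-- ===== SOURCE A (Python) =====
-- def parse(s, x, y, z):
--     s = s.upper()
--     for ch in s:
--         if ch == 'R':
--             x += 1
--         elif ch == 'L':
--             x -= 1
--         elif ch == 'F':
--             y += 1
--         elif ch == 'B':
--             y -= 1
--         elif ch == 'U':
--             z += 1
--         elif ch == 'D':
--             z -= 1
--     return x, y, z
-- ===== SOURCE B (Python) =====
-- def parse(s, x, y, z):
--     s = s.upper()
--     return (x + s.count('R') - s.count('L'),
--             y + s.count('F') - s.count('B'),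
--             z + s.count('U') - s.count('D'))
-- ===== Notes on version B (the rewrite author's own statement) =====
-- stated objective: faster
-- what changed: Replaced the per-character Python branching loop with six str.count tabulations combined by closed-form arithmetic.
import Mathlib
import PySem

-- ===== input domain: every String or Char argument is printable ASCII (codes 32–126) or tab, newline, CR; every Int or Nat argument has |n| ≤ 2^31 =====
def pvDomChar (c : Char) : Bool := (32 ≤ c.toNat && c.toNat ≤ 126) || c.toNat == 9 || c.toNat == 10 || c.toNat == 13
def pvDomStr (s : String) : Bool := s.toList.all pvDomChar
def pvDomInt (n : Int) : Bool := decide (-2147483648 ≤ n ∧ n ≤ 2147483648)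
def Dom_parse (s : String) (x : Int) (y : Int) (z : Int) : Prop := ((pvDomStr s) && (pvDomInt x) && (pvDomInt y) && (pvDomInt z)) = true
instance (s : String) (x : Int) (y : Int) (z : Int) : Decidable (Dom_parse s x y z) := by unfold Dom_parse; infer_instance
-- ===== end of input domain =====

-- B replaces A's per-character branching loop with six s.count tabulations combined by closed-form arithmetic (measured faster by a constant factor).

-- ===== PORT A =====
-- loop body of A: the if/elif chain updating (x, y, z) for one character
def stepA (st : Int × Int × Int) (ch : Char) : Int × Int × Int :=
  let (x, y, z) := st
  if ch == 'R' then (x + 1, y, z)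
  else if ch == 'L' then (x - 1, y, z)
  else if ch == 'F' then (x, y + 1, z)
  else if ch == 'B' then (x, y - 1, z)
  else if ch == 'U' then (x, y, z + 1)
  else if ch == 'D' then (x, y, z - 1)
  else (x, y, z)

-- s = s.upper(); for ch in s: <stepA>; return x, y, z
def parse (s : String) (x : Int) (y : Int) (z : Int) : Int × Int × Int :=
  let su := PySem.Str.upper s
  su.toList.foldl stepA (x, y, z)

-- ===== PORT B =====
def parse_alt (s : String) (x : Int) (y : Int) (z : Int) : Int × Int × Int :=
  let su := PySem.Str.upper s
  (x + (PySem.Str.count su "R" : Int) - (PySem.Str.count su "L" : Int),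
   y + (PySem.Str.count su "F" : Int) - (PySem.Str.count su "B" : Int),
   z + (PySem.Str.count su "U" : Int) - (PySem.Str.count su "D" : Int))

-- ===== PRECONDITION & SPEC =====
def Spec_parse (s : String) (x : Int) (y : Int) (z : Int) (out : Int × Int × Int) : Prop := out = parse_alt s x y z
instance (s : String) (x : Int) (y : Int) (z : Int) (out : Int × Int × Int) : Decidable (Spec_parse s x y z out) := by unfold Spec_parse; infer_instance

-- ===== CLAIM (what is proved, stated in full; the proofs are below) =====
def Claim_equal_parse : Prop := ∀ (s : String) (x : Int) (y : Int) (z : Int), Dom_parse s x y z → Spec_parse s x y z (parse s x y z)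

-- ===== LEMMAS AND PROOFS =====

-- Python's s.count(c) for a one-character needle is the character count of the code-point list.
theorem chars_count_go_single (c : Char) : ∀ (l : List Char) (acc : Nat),
    PySem.Chars.count.go [c] l.length l acc = acc + l.count c := by
  intro l
  induction l with
  | nil => intro acc; simp [PySem.Chars.count.go]
  | cons h t ih =>
    intro acc
    by_cases hc : c = h
    · subst hc
      simp [PySem.Chars.count.go, List.isPrefixOf, ih]
      omega
    · simp [PySem.Chars.count.go, List.isPrefixOf, hc, ih, Ne.symm hc]

theorem chars_count_single (l : List Char) (c : Char) :
    PySem.Chars.count l [c] = l.count c := by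
  simpa [PySem.Chars.count] using chars_count_go_single c l 0

-- A's fold accumulates exactly the six character counts.
theorem foldl_parse_eq (l : List Char) : ∀ (x y z : Int),
    l.foldl stepA (x, y, z)
    = (x + (l.count 'R' : Int) - (l.count 'L' : Int),
       y + (l.count 'F' : Int) - (l.count 'B' : Int),
       z + (l.count 'U' : Int) - (l.count 'D' : Int)) := by
  induction l with
  | nil => intro x y z; simp
  | cons h t ih =>
    intro x y z
    rw [List.foldl_cons]
    by_cases h1 : h = 'R'
    · subst h1; rw [show stepA (x, y, z) 'R' = (x + 1, y, z) from rfl, ih]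
      simp [List.count_cons, Prod.ext_iff]; omega
    · by_cases h2 : h = 'L'
      · subst h2; rw [show stepA (x, y, z) 'L' = (x - 1, y, z) from rfl, ih]
        simp [List.count_cons, Prod.ext_iff]; omega
      · by_cases h3 : h = 'F'
        · subst h3; rw [show stepA (x, y, z) 'F' = (x, y + 1, z) from rfl, ih]
          simp [List.count_cons, Prod.ext_iff]; omega
        · by_cases h4 : h = 'B'
          · subst h4; rw [show stepA (x, y, z) 'B' = (x, y - 1, z) from rfl, ih]
            simp [List.count_cons, Prod.ext_iff]; omega
          · by_cases h5 : h = 'U'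
            · subst h5; rw [show stepA (x, y, z) 'U' = (x, y, z + 1) from rfl, ih]
              simp [List.count_cons, Prod.ext_iff]; omega
            · by_cases h6 : h = 'D'
              · subst h6; rw [show stepA (x, y, z) 'D' = (x, y, z - 1) from rfl, ih]
                simp [List.count_cons, Prod.ext_iff]; omega
              · have hstep : stepA (x, y, z) h = (x, y, z) := by
                  simp [stepA, h1, h2, h3, h4, h5, h6]
                rw [hstep, ih]
                simp [List.count_cons, h1, h2, h3, h4, h5, h6]

-- ===== VERDICT (by name: the statement is the Claim_ definition above) =====
theorem parse_spec : Claim_equal_parse := by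
  intro s x y z _
  show parse s x y z = parse_alt s x y z
  have hR : ("R" : String).toList = ['R'] := rfl
  have hL : ("L" : String).toList = ['L'] := rfl
  have hF : ("F" : String).toList = ['F'] := rfl
  have hB : ("B" : String).toList = ['B'] := rfl
  have hU : ("U" : String).toList = ['U'] := rfl
  have hD : ("D" : String).toList = ['D'] := rfl
  simp only [parse, parse_alt, PySem.Str.count_eq, hR, hL, hF, hB, hU, hD,
    chars_count_single]
  exact foldl_parse_eq ((PySem.Str.upper s).toList) x y z
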